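-- pv_equiv track=rewrite | github.com/IgrMd/yandex-algos-training | Тренировки по алгоритмам 8.0/Тема 7, 8. Префиксные суммы и два указателя. Сортировка событий/I.py | transparency
-- ===== SOURCE A (Python) =====
-- import math
--
-- def transparency(n: int, d: int, trees: set):
--     r = int(math.sqrt(d))
--     dxy = set()
--     y = r
--     for x in range(r + 1):
--         while x * x + y * y > d and y >= 0:
--             y -= 1
--         if x * x + y * y == d:
--             dxy.add((x, y))
--             dxy.add((-x, y))
--             dxy.add((x, -y))
--             dxy.add((-x, -y))
--     ans = 0
--     for x, y in trees:
--         for dx, dy in dxy: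
--             if (x + dx, y + dy) in trees:
--                 ans += 1
--
--     return ans // 2
-- ===== SOURCE B (Python) =====
-- def transparency(n: int, d: int, trees: set):
--     # Brute force over all ordered pairs of trees; each unordered pair at squared
--     # distance d is counted twice (and each tree pairs with itself when d == 0),
--     # so cnt // 2 gives the same answer as the lattice-offset method.
--     pts = list(trees)
--     cnt = 0
--     for ax, ay in pts:
--         for bx, by in pts:
--             if (ax - bx) ** 2 + (ay - by) ** 2 == d:
--                 cnt += 1
--     return cnt // 2
-- ===== Notes on version B (the rewrite author's own statement) =====
-- stated objective: simpler
-- what changed: Replaces the floor-sqrt + two-pointer enumeration of lattice offsets at squared distance d (and the per-tree offset/membership scan) by a direct double loop over all ordered tree pairs counting those at squared distance d, halved.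
-- crash fix: For d < 0, A raises ValueError (math.sqrt of a negative number) while B returns 0 (no pair of points has a negative squared distance). — e.g. on transparency(1, -1, [(0, 0)]): A raises ValueError, B returns 0
import Mathlib
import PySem

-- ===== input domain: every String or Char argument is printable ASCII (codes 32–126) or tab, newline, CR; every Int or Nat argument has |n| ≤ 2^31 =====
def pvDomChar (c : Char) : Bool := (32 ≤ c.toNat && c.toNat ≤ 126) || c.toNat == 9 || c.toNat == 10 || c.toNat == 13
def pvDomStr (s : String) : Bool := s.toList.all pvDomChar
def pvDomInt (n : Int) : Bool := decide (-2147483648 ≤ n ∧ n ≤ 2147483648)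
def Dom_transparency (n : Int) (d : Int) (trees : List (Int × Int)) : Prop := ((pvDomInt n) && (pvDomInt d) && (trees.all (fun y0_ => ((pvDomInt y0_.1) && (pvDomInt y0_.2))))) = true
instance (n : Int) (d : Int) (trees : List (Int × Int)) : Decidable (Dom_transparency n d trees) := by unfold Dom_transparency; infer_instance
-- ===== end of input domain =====

-- B replaces A's floor-sqrt + two-pointer enumeration of lattice offsets at squared
-- distance d by a plain double loop over ordered tree pairs, halved (objective: simpler).

-- ===== PORT A =====
-- the inner loop 'while x * x + y * y > d and y >= 0: y -= 1'
def whileA (d x y : Int) : Int :=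
  if x * x + y * y > d ∧ 0 ≤ y then whileA d x (y - 1) else y
termination_by (y + 1).toNat
decreasing_by omega

-- one iteration of 'for x in range(r + 1)' (state: y, dxy)
def stepA (d : Int) (st : Int × PySem.Set (Int × Int)) (x : Int) : Int × PySem.Set (Int × Int) :=
  let y := whileA d x st.1
  (y, if x * x + y * y = d then
        ((((PySem.Set.add st.2 (x, y)).add (-x, y)).add (x, -y)).add (-x, -y))
      else st.2)

def transparency (n : Int) (d : Int) (trees : List (Int × Int)) : Int :=
  -- r = int(math.sqrt(d)): exact, since math.sqrt is correctly rounded, so for the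
  -- admitted 0 ≤ d ≤ 2^31 int(math.sqrt(d)) is the floor square root; d < 0
  -- (ValueError) is outside Pre_
  let r : Int := (Nat.sqrt d.toNat : Int)
  let st := (PySem.List.pyRange 0 (r + 1) 1).foldl (stepA d) (r, PySem.Set.empty)
  let ans := trees.foldl (fun ans t =>
    st.2.foldl (fun a v => if (t.1 + v.1, t.2 + v.2) ∈ trees then a + 1 else a) ans) 0
  PySem.Int.floordiv ans 2

-- ===== PORT B =====
def transparency_alt (n : Int) (d : Int) (trees : List (Int × Int)) : Int :=
  let cnt := trees.foldl (fun cnt a =>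
    trees.foldl (fun cnt b =>
      if (a.1 - b.1) ^ 2 + (a.2 - b.2) ^ 2 = d then cnt + 1 else cnt) cnt) 0
  PySem.Int.floordiv cnt 2

-- ===== PRECONDITION & SPEC =====
-- Pre_ excludes d < 0, on which A raises ValueError (math.sqrt of a negative number),
-- and lists with duplicate elements, which do not represent a Python set (trees : set).
def Pre_transparency (n : Int) (d : Int) (trees : List (Int × Int)) : Prop :=
  0 ≤ d ∧ trees.Nodup
instance (n : Int) (d : Int) (trees : List (Int × Int)) : Decidable (Pre_transparency n d trees) := by unfold Pre_transparency; infer_instance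
def pvWitness_transparency : Int × Int × (List (Int × Int)) := (3, 2, [(0, 0), (1, 1)])

-- For d < 0, A raises ValueError (math.sqrt of a negative number) while B returns 0.
def Raises_transparency (n : Int) (d : Int) (trees : List (Int × Int)) : Prop := d < 0
instance (n : Int) (d : Int) (trees : List (Int × Int)) : Decidable (Raises_transparency n d trees) := by unfold Raises_transparency; infer_instance
def pvRaiseWitness_transparency : Int × Int × (List (Int × Int)) := (1, -1, [(0, 0)])
def pvRaiseWitnessOut_transparency : Int := 0

def Spec_transparency (n : Int) (d : Int) (trees : List (Int × Int)) (out : Int) : Prop := out = transparency_alt n d trees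
instance (n : Int) (d : Int) (trees : List (Int × Int)) (out : Int) : Decidable (Spec_transparency n d trees out) := by unfold Spec_transparency; infer_instance

-- ===== CLAIM (what is proved, stated in full; the proofs are below) =====
def Claim_equal_transparency : Prop := ∀ (n : Int) (d : Int) (trees : List (Int × Int)), Dom_transparency n d trees → Pre_transparency n d trees → Spec_transparency n d trees (transparency n d trees)
def Claim_raises_transparency : Prop := (∀ (n : Int) (d : Int) (trees : List (Int × Int)), Dom_transparency n d trees → Raises_transparency n d trees → ¬ Pre_transparency n d trees) ∧ (Dom_transparency (pvRaiseWitness_transparency.1) (pvRaiseWitness_transparency.2.1) (pvRaiseWitness_transparency.2.2) ∧ Raises_transparency (pvRaiseWitness_transparency.1) (pvRaiseWitness_transparency.2.1) (pvRaiseWitness_transparency.2.2) ∧ transparency_alt (pvRaiseWitness_transparency.1) (pvRaiseWitness_transparency.2.1) (pvRaiseWitness_transparency.2.2) = pvRaiseWitnessOut_transparency)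

-- ===== LEMMAS AND PROOFS =====

-- properties of the inner while loop
theorem whileA_le (d x y : Int) : whileA d x y ≤ y := by
  fun_induction whileA with
  | case1 y h ih => omega
  | case2 y h => omega

theorem whileA_ge (d x y : Int) : -1 ≤ y → -1 ≤ whileA d x y := by
  fun_induction whileA with
  | case1 y h2 ih => intro _; exact ih (by omega)
  | case2 y h2 => intro h; omega

theorem whileA_stop (d x y : Int) : x * x + whileA d x y * whileA d x y ≤ d ∨ whileA d x y < 0 := by
  fun_induction whileA with
  | case1 y h ih => exact ih
  | case2 y h =>
    rw [not_and_or] at h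
    rcases h with h | h
    · left; omega
    · right; omega

theorem whileA_above (d x y : Int) : ∀ z, whileA d x y < z → z ≤ y → x * x + z * z > d := by
  fun_induction whileA with
  | case1 y h ih =>
    intro z h1 h2
    rcases eq_or_lt_of_le h2 with rfl | h3
    · exact h.1
    · exact ih z h1 (by omega)
  | case2 y h => intro z h1 h2; omega

-- the loop invariant for A's fold over range(r + 1), after k iterations: y stays in
-- [-1, r], everything strictly above y is infeasible for the next x, and dxy holds
-- exactly the lattice points at squared distance d whose first coordinate is < k in
-- absolute value
def InvA (d r : Int) (k : Nat) : Prop :=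
  let st := (PySem.List.pyRange 0 (k : Int) 1).foldl (stepA d) (r, PySem.Set.empty)
  (-1 ≤ st.1 ∧ st.1 ≤ r) ∧
  (∀ z : Int, st.1 < z → z ≤ r → (k : Int) * (k : Int) + z * z > d) ∧
  st.2.Nodup ∧
  (∀ v : Int × Int, v ∈ st.2 ↔ (v.1 * v.1 + v.2 * v.2 = d ∧ v.1.natAbs < k))

-- if there is a nonnegative y* with x^2 + y*^2 = d, the while loop lands exactly on it
theorem whileA_exact (d r : Int) (hrd : d < (r + 1) * (r + 1))
    (y0 : Int) (hy0l : -1 ≤ y0) (hy0r : y0 ≤ r)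
    (x : Int) (hb : ∀ z : Int, y0 < z → z ≤ r → x * x + z * z > d)
    (ys : Int) (hys : 0 ≤ ys) (heq : x * x + ys * ys = d) :
    whileA d x y0 = ys := by
  have hysr : ys ≤ r := by nlinarith
  have h1 : ys ≤ y0 := by
    by_contra h
    have := hb ys (by omega) hysr
    omega
  have h2 : ys ≤ whileA d x y0 := by
    by_contra h
    have := whileA_above d x y0 ys (by omega) h1
    omega
  rcases whileA_stop d x y0 with h3 | h3
  · nlinarith
  · omega

set_option maxHeartbeats 1000000 in
theorem invA_holds (d r : Int) (hd : 0 ≤ d) (hrr : 0 ≤ r) (hrd : d < (r + 1) * (r + 1))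
    (k : Nat) (hk : (k : Int) ≤ r + 1) : InvA d r k := by
  induction k with
  | zero =>
    unfold InvA
    rw [PySem.List.pyRange_one_eq_nil (by simp)]
    simp only [List.foldl_nil]
    refine ⟨⟨by omega, le_refl r⟩, by omega, List.nodup_nil, ?_⟩
    intro v
    simp
  | succ k ih =>
    have hk' : (k : Int) ≤ r := by push_cast at hk ⊢; omega
    obtain ⟨⟨ha1, ha2⟩, hb, hn, hc⟩ := ih (by omega)
    set st := (PySem.List.pyRange 0 (k : Int) 1).foldl (stepA d) (r, PySem.Set.empty) with hst
    unfold InvA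
    rw [show (((k + 1 : Nat)) : Int) = (k : Int) + 1 from by push_cast; ring,
      PySem.List.pyRange_one_succ_right (Int.natCast_nonneg k), List.foldl_append, ← hst]
    simp only [List.foldl_cons, List.foldl_nil, stepA]
    set y1 := whileA d (k : Int) st.1 with hy1
    have hy1a : -1 ≤ y1 := whileA_ge _ _ _ ha1
    have hy1b : y1 ≤ st.1 := whileA_le _ _ _
    have hex : ∀ ys : Int, 0 ≤ ys → (k : Int) * (k : Int) + ys * ys = d → y1 = ys := by
      intro ys h1 h2
      exact whileA_exact d r hrd st.1 ha1 ha2 (k : Int) (fun z hz1 hz2 => hb z hz1 hz2) ys h1 h2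
    have hb' : ∀ z : Int, y1 < z → z ≤ r → ((k : Int) + 1) * ((k : Int) + 1) + z * z > d := by
      intro z h1 h2
      have hk0 : (0 : Int) ≤ (k : Int) := Int.natCast_nonneg k
      rcases le_or_gt z st.1 with h3 | h3
      · have := whileA_above d (k : Int) st.1 z h1 h3
        nlinarith
      · have := hb z h3 h2
        nlinarith
    by_cases hcond : (k : Int) * (k : Int) + y1 * y1 = d
    · rw [if_pos hcond]
      have hy1nn : 0 ≤ y1 := by
        by_contra h
        have h0 : y1 = -1 := by omega
        rw [h0] at hcond
        norm_num at hcond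
        have h1r : (1 : Int) ≤ r := by nlinarith
        rcases le_or_gt 1 st.1 with hs | hs
        · have := whileA_above d (k : Int) st.1 1 (by omega) hs
          linarith
        · have := hb 1 (by omega) h1r
          linarith
      refine ⟨⟨hy1a, le_trans hy1b ha2⟩, hb', ?_, ?_⟩
      · exact PySem.Set.nodup_add _ _ (PySem.Set.nodup_add _ _ (PySem.Set.nodup_add _ _ (PySem.Set.nodup_add _ _ hn)))
      · intro v
        obtain ⟨v1, v2⟩ := v
        simp only [PySem.Set.mem_add, hc, Prod.mk.injEq]
        constructor
        · rintro ((((hv | ⟨rfl, rfl⟩) | ⟨rfl, rfl⟩) | ⟨rfl, rfl⟩) | ⟨rfl, rfl⟩)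
          · exact ⟨hv.1, by omega⟩
          · exact ⟨hcond, by simp⟩
          · refine ⟨by nlinarith, by simp⟩
          · refine ⟨by nlinarith, by simp⟩
          · refine ⟨by nlinarith, by simp⟩
        · rintro ⟨hveq, hvlt⟩
          rcases Nat.lt_or_ge v1.natAbs k with h | h
          · exact Or.inl (Or.inl (Or.inl (Or.inl ⟨hveq, h⟩)))
          · have hk1 : v1.natAbs = k := by omega
            have hv1 : v1 = (k : Int) ∨ v1 = -(k : Int) := by
              rcases Int.natAbs_eq v1 with h2 | h2 <;> rw [hk1] at h2 <;> tauto
            have hsq : v1 * v1 = (k : Int) * (k : Int) := by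
              rcases hv1 with h2 | h2 <;> rw [h2] <;> ring
            have habs : (k : Int) * (k : Int) + (v2.natAbs : Int) * (v2.natAbs : Int) = d := by
              have := Int.natAbs_mul_self' v2
              omega
            have hy1v : y1 = (v2.natAbs : Int) := hex _ (Int.natCast_nonneg _) habs
            have hv2 : v2 = y1 ∨ v2 = -y1 := by
              rcases Int.natAbs_eq v2 with h2 | h2 <;> omega
            rcases hv1 with rfl | rfl <;> rcases hv2 with rfl | rfl <;> tauto
    · rw [if_neg hcond]
      refine ⟨⟨hy1a, le_trans hy1b ha2⟩, hb', hn, ?_⟩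
      intro v
      rw [hc]
      constructor
      · rintro ⟨h1, h2⟩; exact ⟨h1, by omega⟩
      · rintro ⟨h1, h2⟩
        refine ⟨h1, ?_⟩
        rcases Nat.lt_or_ge v.1.natAbs k with h | h
        · exact h
        · exfalso
          have hk1 : v.1.natAbs = k := by omega
          have hsq : v.1 * v.1 = (k : Int) * (k : Int) := by
            rcases Int.natAbs_eq v.1 with h2 | h2 <;> rw [hk1] at h2 <;> rw [h2] <;> ring
          have habs : (k : Int) * (k : Int) + (v.2.natAbs : Int) * (v.2.natAbs : Int) = d := by
            have := Int.natAbs_mul_self' v.2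
            omega
          exact hcond (by rw [hex _ (Int.natCast_nonneg _) habs]; exact habs)

-- A's dxy is exactly the set of lattice points at squared distance d
theorem dxy_char (d : Int) (hd : 0 ≤ d) :
    let r : Int := (Nat.sqrt d.toNat : Int)
    let st := (PySem.List.pyRange 0 (r + 1) 1).foldl (stepA d) (r, PySem.Set.empty)
    st.2.Nodup ∧ ∀ v : Int × Int, v ∈ st.2 ↔ v.1 * v.1 + v.2 * v.2 = d := by
  intro r st
  have hrr : 0 ≤ r := Int.natCast_nonneg _
  have hrd : d < (r + 1) * (r + 1) := by
    have h0 : d.toNat < (Nat.sqrt d.toNat + 1) * (Nat.sqrt d.toNat + 1) := by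
      have := Nat.lt_succ_sqrt' d.toNat
      nlinarith
    have h1 : (d.toNat : Int) < (((Nat.sqrt d.toNat + 1) * (Nat.sqrt d.toNat + 1) : Nat) : Int) := by
      exact_mod_cast h0
    have h2 : (d.toNat : Int) = d := Int.toNat_of_nonneg hd
    push_cast at h1
    simp only [r]
    linarith
  have hcast : (((r + 1).toNat : Nat) : Int) = r + 1 := Int.toNat_of_nonneg (by omega)
  have inv := invA_holds d r hd hrr hrd (r + 1).toNat (by omega)
  unfold InvA at inv
  rw [hcast] at inv
  obtain ⟨_, _, hn, hc⟩ := inv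
  refine ⟨hn, fun v => ?_⟩
  rw [hc v]
  constructor
  · exact fun h => h.1
  · intro h
    refine ⟨h, ?_⟩
    have h1 : (v.1.natAbs : Int) < r + 1 := by
      by_contra h2
      have h3 : (v.1.natAbs : Int) * (v.1.natAbs : Int) = v.1 * v.1 := Int.natAbs_mul_self' v.1
      have h4 : 0 ≤ v.2 * v.2 := mul_self_nonneg v.2
      nlinarith
    omega

-- per tree, A's offset/membership count equals B's pair count (translation bijection)
theorem count_eq (d : Int) (trees dxy : List (Int × Int)) (hnd : trees.Nodup)
    (hS : dxy.Nodup) (hchar : ∀ v : Int × Int, v ∈ dxy ↔ v.1 * v.1 + v.2 * v.2 = d)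
    (a : Int × Int) :
    dxy.countP (fun v => decide ((a.1 + v.1, a.2 + v.2) ∈ trees)) =
    trees.countP (fun b => decide ((a.1 - b.1) ^ 2 + (a.2 - b.2) ^ 2 = d)) := by
  rw [List.countP_eq_length_filter, List.countP_eq_length_filter]
  have hperm : ((dxy.filter (fun v => decide ((a.1 + v.1, a.2 + v.2) ∈ trees))).map
      (fun v => (a.1 + v.1, a.2 + v.2))).Perm
      (trees.filter (fun b => decide ((a.1 - b.1) ^ 2 + (a.2 - b.2) ^ 2 = d))) := by
    rw [List.perm_ext_iff_of_nodup]
    · intro w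
      rw [List.mem_map, List.mem_filter]
      constructor
      · rintro ⟨v, hv, rfl⟩
        rw [List.mem_filter] at hv
        obtain ⟨hv1, hv2⟩ := hv
        refine ⟨by simpa using hv2, ?_⟩
        rw [decide_eq_true_iff]
        have h := (hchar v).mp hv1
        linear_combination h
      · rintro ⟨hw1, hw2⟩
        rw [decide_eq_true_iff] at hw2
        refine ⟨(w.1 - a.1, w.2 - a.2), ?_, by ext <;> simp <;> ring⟩
        rw [List.mem_filter]
        refine ⟨(hchar _).mpr (by linear_combination hw2), ?_⟩
        rw [decide_eq_true_iff]
        have h1 : a.1 + (w.1 - a.1) = w.1 := by ring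
        have h2 : a.2 + (w.2 - a.2) = w.2 := by ring
        rw [h1, h2]
        exact hw1
    · refine List.Nodup.map ?_ (List.Nodup.filter _ hS)
      intro v w h
      rw [Prod.ext_iff] at h ⊢
      obtain ⟨h1, h2⟩ := h
      simp only at h1 h2 ⊢
      omega
    · exact List.Nodup.filter _ hnd
  rw [← hperm.length_eq, List.length_map]

-- ===== VERDICT (by name: the statement is the Claim_ definition above) =====
theorem transparency_spec : Claim_equal_transparency := by
  intro n d trees _ hpre
  obtain ⟨hd, hnd⟩ := hpre
  unfold Spec_transparency
  obtain ⟨hS, hchar⟩ := dxy_char d hd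
  simp only [transparency, transparency_alt]
  simp only [PySem.List.foldl_ite_add_one, PySem.List.foldl_add]
  congr 2
  exact congrArg List.sum (List.map_congr_left fun t _ => by
    exact_mod_cast count_eq d trees _ hnd hS hchar t)

def transparency_raises : Claim_raises_transparency := by
  unfold Claim_raises_transparency
  exact ⟨fun n d trees _ hr hp => absurd hp.1 (not_le.mpr hr), by decide⟩
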